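-- pv_equiv track=rewrite | github.com/shopeetw225-byte/openclaw-social-push | openclaw-cluster-orchestrator/scripts/cluster_markdown_utils.py | is_separator_row
-- ===== SOURCE A (Python) =====
-- def split_markdown_row(line: str) -> list[str]:
--     stripped = line.strip()
--     if stripped.startswith("|"):
--         stripped = stripped[1:]
--     if stripped.endswith("|"):
--         stripped = stripped[:-1]
--
--     cells: list[str] = []
--     current: list[str] = []
--     index = 0
--     while index < len(stripped):
--         char = stripped[index]
--         if (
--             char == "\\"
--             and index + 1 < len(stripped)
--             and stripped[index + 1] in {"|", "\\"}
--         ):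
--             current.append(stripped[index + 1])
--             index += 2
--             continue
--         if char == "|":
--             cells.append("".join(current).strip())
--             current = []
--             index += 1
--             continue
--         current.append(char)
--         index += 1
--
--     cells.append("".join(current).strip())
--     return cells
--
-- def is_separator_row(line: str) -> bool:
--     cells = split_markdown_row(line)
--     if not cells:
--         return False
--     for cell in cells:
--         if not cell:
--             return False
--         if any(char not in "-: " for char in cell):
--             return False
--     return True
-- ===== SOURCE B (Python) =====
-- def _is_sep_cell(cell: str) -> bool:
--     core = cell.strip()
--     return bool(core) and all(ch in "-: " for ch in core)
--
-- def is_separator_row(line: str) -> bool: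
--     s = line.strip()
--     if s.startswith("|"):
--         s = s[1:]
--     if s.endswith("|"):
--         s = s[:-1]
--     return all(_is_sep_cell(cell) for cell in s.split("|"))
-- ===== Notes on version B (the rewrite author's own statement) =====
-- stated objective: simpler
-- what changed: B drops the hand-written escape-aware character scanner (index loop, escape lookahead, cell accumulator list) and instead splits the pipe-trimmed line on pipes with str.split, checking each cell directly; escape handling is unnecessary for the boolean because any backslash invalidates whichever cell it lands in under either splitting.
import Mathlib
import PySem

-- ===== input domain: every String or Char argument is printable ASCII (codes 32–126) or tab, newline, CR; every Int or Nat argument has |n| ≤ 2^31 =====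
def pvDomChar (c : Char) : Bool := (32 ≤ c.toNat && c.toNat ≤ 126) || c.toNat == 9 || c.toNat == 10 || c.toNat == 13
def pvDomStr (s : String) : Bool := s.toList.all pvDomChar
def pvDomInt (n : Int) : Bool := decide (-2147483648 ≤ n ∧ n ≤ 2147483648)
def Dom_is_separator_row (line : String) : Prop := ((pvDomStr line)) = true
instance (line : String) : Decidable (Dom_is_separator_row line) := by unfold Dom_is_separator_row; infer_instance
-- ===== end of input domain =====

-- B replaces the hand-written escape-aware character scanner by a builtin split on pipes plus a direct per-cell check (objective: simpler; a timing run measured B faster).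

-- ===== PORT A =====
-- while-loop of split_markdown_row: recursion over the remaining characters, `cur` = current
def smrLoop : List Char → List Char → List (List Char)
  | '\\' :: d :: rest, cur =>
      if d = '|' ∨ d = '\\' then smrLoop rest (cur ++ [d])
      else smrLoop (d :: rest) (cur ++ ['\\'])
  | '|' :: rest, cur => PySem.Chars.strip cur :: smrLoop rest []
  | c :: rest, cur => smrLoop rest (cur ++ [c])
  | [], cur => [PySem.Chars.strip cur]
  termination_by cs _ => cs.length

-- cells kept as List Char (the join/strip of `current`), exact on the char level
def split_markdown_row (line : String) : List (List Char) :=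
  let stripped := PySem.Chars.strip line.toList
  let stripped := if PySem.Chars.startswith stripped ['|'] then PySem.List.slice stripped (some 1) none else stripped
  let stripped := if PySem.Chars.endswith stripped ['|'] then PySem.List.slice stripped none (some (-1)) else stripped
  smrLoop stripped []

def is_separator_row (line : String) : Bool :=
  let cells := split_markdown_row line
  if cells = [] then false
  else cells.all (fun cell => !cell.isEmpty && !(cell.any (fun ch => !(['-', ':', ' '].contains ch))))

-- ===== PORT B =====
-- _is_sep_cell of Source B
def isSepCell (cell : List Char) : Bool :=
  let core := PySem.Chars.strip cell
  !core.isEmpty && core.all (fun ch => ['-', ':', ' '].contains ch)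

def is_separator_row_alt (line : String) : Bool :=
  let s := PySem.Chars.strip line.toList
  let s := if PySem.Chars.startswith s ['|'] then PySem.List.slice s (some 1) none else s
  let s := if PySem.Chars.endswith s ['|'] then PySem.List.slice s none (some (-1)) else s
  (PySem.Chars.splitOn s ['|']).all isSepCell

-- ===== PRECONDITION & SPEC =====
def Spec_is_separator_row (line : String) (out : Bool) : Prop := out = is_separator_row_alt line
instance (line : String) (out : Bool) : Decidable (Spec_is_separator_row line out) := by unfold Spec_is_separator_row; infer_instance

-- ===== CLAIM =====
def Claim_equal_is_separator_row : Prop := ∀ (line : String), Dom_is_separator_row line → Spec_is_separator_row line (is_separator_row line)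

-- ===== LEMMAS AND PROOFS =====

-- abbreviations used only by the proofs
def pvOk (c : Char) : Bool := ['-', ':', ' '].contains c
def Pcell (cell : List Char) : Bool := !cell.isEmpty && !(cell.any (fun ch => !(['-', ':', ' '].contains ch)))
-- naive split on '|' (no escapes), with accumulator, as B's s.split('|') computes it
def nsplit : List Char → List Char → List (List Char)
  | [], cur => [cur]
  | c :: rest, cur => if c = '|' then cur :: nsplit rest [] else nsplit rest (cur ++ [c])
-- a disqualifying char for a cell: neither whitespace (strippable) nor in "-: "
def HasBad (cur : List Char) : Prop := ∃ c ∈ cur, PySem.Chars.isspace c = false ∧ pvOk c = false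

theorem mem_strip_of_not_ws {c : Char} {l : List Char} (hm : c ∈ l)
    (hw : PySem.Chars.isspace c = false) : c ∈ PySem.Chars.strip l := by
  unfold PySem.Chars.strip PySem.Chars.rstrip PySem.Chars.lstrip
  have step : ∀ (m : List Char), c ∈ m → c ∈ List.dropWhile PySem.Chars.isspace m := by
    intro m hc
    rcases (List.mem_append.mp (by rw [List.takeWhile_append_dropWhile]; exact hc :
        c ∈ List.takeWhile PySem.Chars.isspace m ++ List.dropWhile PySem.Chars.isspace m)) with h | h
    · exact absurd (List.mem_takeWhile_imp h) (by simp [hw])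
    · exact h
  simpa using step _ (by simpa using step l hm)

theorem Pcell_strip (cur : List Char) : Pcell (PySem.Chars.strip cur) = isSepCell cur := by
  simp [Pcell, isSepCell, List.all_eq_not_any_not]

theorem Pcell_doom {cur : List Char} (hd : HasBad cur) : Pcell (PySem.Chars.strip cur) = false := by
  obtain ⟨c, hc, hws, hok⟩ := hd
  have hmem : c ∈ PySem.Chars.strip cur := mem_strip_of_not_ws hc hws
  simp [Pcell]
  intro _
  have hq := hok
  simp [pvOk] at hq
  exact ⟨c, hmem, hq.1, hq.2.1, hq.2.2⟩

theorem bad_append {cur : List Char} (x : Char) (hd : HasBad cur) : HasBad (cur ++ [x]) := by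
  obtain ⟨c, hc, p, q⟩ := hd
  exact ⟨c, List.mem_append_left _ hc, p, q⟩

-- a doomed `cur` makes A's whole answer false
theorem doomA (cs cur : List Char) : HasBad cur → (smrLoop cs cur).all Pcell = false := by
  fun_induction smrLoop cs cur with
  | case1 d rest cur hcond ih => exact fun hd => ih (bad_append d hd)
  | case2 d rest cur hcond ih => exact fun hd => ih (bad_append '\\' hd)
  | case3 rest cur ih => intro hd; simp [Pcell_doom hd]
  | case4 c rest cur h1 h2 ih => exact fun hd => ih (bad_append c hd)
  | case5 cur => intro hd; simp [Pcell_doom hd]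

-- a doomed `cur` makes B's whole answer false too
theorem doomB : ∀ (cs cur : List Char), HasBad cur → (nsplit cs cur).all isSepCell = false := by
  intro cs
  induction cs with
  | nil => intro cur hd; simp [nsplit, ← Pcell_strip, Pcell_doom hd]
  | cons c rest ih =>
    intro cur hd
    simp only [nsplit]
    split_ifs with hc
    · simp [← Pcell_strip, Pcell_doom hd]
    · exact ih _ (bad_append c hd)

theorem bad_backslash {cur : List Char} : HasBad (cur ++ ['\\']) :=
  ⟨'\\', List.mem_append_right _ (by simp), by decide, by decide⟩

-- main invariant: A's escaped split-and-validate agrees with B's naive split-and-validate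
theorem mainLoop (cs cur : List Char) :
    (smrLoop cs cur).all Pcell = (nsplit cs cur).all isSepCell := by
  fun_induction smrLoop cs cur with
  | case1 d rest cur hcond ih =>
    clear ih
    have hA : (smrLoop rest (cur ++ [d])).all Pcell = false := by
      apply doomA
      refine ⟨d, List.mem_append_right _ (by simp), ?_, ?_⟩ <;>
        rcases hcond with rfl | rfl <;> decide
    have hB : (nsplit ('\\' :: d :: rest) cur).all isSepCell = false := by
      have h1 : nsplit ('\\' :: d :: rest) cur = nsplit (d :: rest) (cur ++ ['\\']) := by
        simp [nsplit]
      rw [h1]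
      exact doomB _ _ bad_backslash
    rw [hA, hB]
  | case2 d rest cur hcond ih =>
    clear ih
    have hA : (smrLoop (d :: rest) (cur ++ ['\\'])).all Pcell = false :=
      doomA _ _ bad_backslash
    have hB : (nsplit ('\\' :: d :: rest) cur).all isSepCell = false := by
      have h1 : nsplit ('\\' :: d :: rest) cur = nsplit (d :: rest) (cur ++ ['\\']) := by
        simp [nsplit]
      rw [h1]
      exact doomB _ _ bad_backslash
    rw [hA, hB]
  | case3 rest cur ih =>
    have h1 : nsplit ('|' :: rest) cur = cur :: nsplit rest [] := by simp [nsplit]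
    rw [h1]
    simp only [List.all_cons, Pcell_strip, ih]
  | case4 c rest cur h1 h2 ih =>
    have hc : c ≠ '|' := fun hh => h2 hh
    have h3 : nsplit (c :: rest) cur = nsplit rest (cur ++ [c]) := by simp [nsplit, hc]
    rw [h3, ih]
  | case5 cur =>
    simp [nsplit, Pcell_strip]

theorem smrLoop_ne_nil (cs cur : List Char) : smrLoop cs cur ≠ [] := by
  fun_induction smrLoop cs cur with
  | case1 d rest cur hcond ih => exact ih
  | case2 d rest cur hcond ih => exact ih
  | case3 rest cur ih => simp
  | case4 c rest cur h1 h2 ih => exact ih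
  | case5 cur => simp

-- PySem's splitOn with a single-char separator is the naive accumulator split
theorem splitOn_go_pipe (fuel : ℕ) : ∀ (l cur : List Char) (acc : List (List Char)),
    l.length < fuel →
    PySem.Chars.splitOn.go ['|'] fuel l cur acc = acc.reverse ++ nsplit l cur.reverse := by
  induction fuel with
  | zero => intro l cur acc h; omega
  | succ fuel ih =>
    intro l cur acc h
    match l with
    | [] => simp [PySem.Chars.splitOn.go, nsplit]
    | c :: rest =>
      by_cases hc : c = '|'
      · subst hc
        have hpre : List.isPrefixOf ['|'] ('|' :: rest) = true := by
          simp [List.isPrefixOf]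
        rw [PySem.Chars.splitOn.go, if_pos hpre]
        have hlen : (List.drop (List.length ['|']) ('|' :: rest)).length < fuel := by
          simp at h ⊢; omega
        rw [ih _ _ _ hlen]
        simp [nsplit]
      · have hpre : List.isPrefixOf ['|'] (c :: rest) = false := by
          simp [List.isPrefixOf]
          exact fun hh => hc hh.symm
        rw [PySem.Chars.splitOn.go, if_neg (by simp [hpre])]
        have hlen : rest.length < fuel := by simp at h; omega
        rw [ih _ _ _ hlen]
        have h3 : nsplit (c :: rest) cur.reverse = nsplit rest (cur.reverse ++ [c]) := by
          simp [nsplit, hc]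
        rw [h3]
        simp

theorem splitOn_pipe (s : List Char) : PySem.Chars.splitOn s ['|'] = nsplit s [] := by
  unfold PySem.Chars.splitOn
  rw [splitOn_go_pipe (s.length + 1) s [] [] (by omega)]
  simp

-- ===== VERDICT (by name: the statement is the Claim_ definition above) =====
theorem is_separator_row_spec : Claim_equal_is_separator_row := by
  intro line _
  show is_separator_row line = is_separator_row_alt line
  simp only [is_separator_row, is_separator_row_alt, split_markdown_row]
  set s0 := PySem.Chars.strip line.toList with hs0
  set s1 := if PySem.Chars.startswith s0 ['|'] then PySem.List.slice s0 (some 1) none else s0 with hs1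
  set s2 := if PySem.Chars.endswith s1 ['|'] then PySem.List.slice s1 none (some (-1)) else s1 with hs2
  rw [if_neg (smrLoop_ne_nil s2 [])]
  rw [splitOn_pipe]
  rw [← mainLoop s2 []]
  rfl
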